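-- pv_equiv track=rewrite | github.com/rdb/nim-panda3d | generate.py | translate_comment
-- ===== SOURCE A (Python) =====
-- def translate_comment(code, prefix="## "):
--     if not code:
--         return ""
--
--     if 'gluPerspective' in code:
--         return ""
--
--     comment = ''
--
--     empty_line = False
--     for line in code.lstrip('/ <\n').rstrip('*/ \n\t').splitlines(False):
--         line = line.strip('\t\n ').lstrip('*/ ')
--         if line:
--             if empty_line:
--                 # New paragraph.
--                 if comment:
--                     comment += '\n' + prefix.rstrip() + '\n'
--                 empty_line = False
--             elif comment:
--                 comment += '\n'
--             comment += prefix + line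
--         else:
--             empty_line = True
--
--     comment = comment.rstrip()
--     if comment:
--         return comment.replace('*', '\\*').replace('|', '\\|')
--     else:
--         return ''
-- ===== SOURCE B (Python) =====
-- def translate_comment(code, prefix="## "):
--     if not code:
--         return ""
--
--     if 'gluPerspective' in code:
--         return ""
--
--     # Collect cleaned lines into paragraphs, then join once.
--     paragraphs = []
--     current = []
--     for line in code.lstrip('/ <\n').rstrip('*/ \n\t').splitlines(False):
--         line = line.strip('\t\n ').lstrip('*/ ')
--         if line:
--             current.append(prefix + line)
--         else:
--             if current:
--                 paragraphs.append(current)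
--             current = []
--     if current:
--         paragraphs.append(current)
--
--     sep = '\n' + prefix.rstrip() + '\n'
--     comment = sep.join('\n'.join(p) for p in paragraphs)
--     comment = comment.rstrip()
--     if comment:
--         return comment.replace('*', '\\*').replace('|', '\\|')
--     return ''
-- ===== Notes on version B (the rewrite author's own statement) =====
-- stated objective: alternative
-- what changed: Replaces A's running string with an empty_line flag by a two-level build: lines are grouped into a list of paragraphs (flushed on blank lines), and the result is produced by two join operations with the intra- and inter-paragraph separators.
import Mathlib
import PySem

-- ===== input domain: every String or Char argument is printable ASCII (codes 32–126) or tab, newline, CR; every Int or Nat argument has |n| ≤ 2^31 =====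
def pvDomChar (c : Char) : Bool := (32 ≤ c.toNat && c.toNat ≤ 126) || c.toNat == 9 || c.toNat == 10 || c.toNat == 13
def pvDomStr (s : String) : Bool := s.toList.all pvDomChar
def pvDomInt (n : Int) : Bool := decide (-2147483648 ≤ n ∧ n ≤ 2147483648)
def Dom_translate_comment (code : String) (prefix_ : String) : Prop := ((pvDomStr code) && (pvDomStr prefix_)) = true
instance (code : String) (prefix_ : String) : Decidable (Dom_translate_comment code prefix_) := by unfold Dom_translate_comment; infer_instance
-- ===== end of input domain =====

-- B groups lines into paragraphs and joins once, instead of A's running string + empty_line flag;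
-- same O(n) cost, different decomposition. Proved equal on ALL inputs (no Pre_).

-- shared strip helpers (Python lstrip(chars)/rstrip(chars); exact on ASCII)
def lstripChars (s chars : List Char) : List Char := s.dropWhile (fun c => chars.contains c)
def rstripChars (s chars : List Char) : List Char := (s.reverse.dropWhile (fun c => chars.contains c)).reverse

-- line.strip('\t\n ').lstrip('*/ '), identical preprocessing in both Pythons
def cleanLine (line : List Char) : List Char :=
  lstripChars (PySem.Chars.stripChars line ('\t' :: '\n' :: ' ' :: [])) ('*' :: '/' :: ' ' :: [])

-- '\n' + prefix.rstrip() + '\n'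
def sepOf (pfx : List Char) : List Char := '\n' :: (PySem.Chars.rstrip pfx ++ ['\n'])

-- code.lstrip('/ <\n').rstrip('*/ \n\t').splitlines(False)
def preLines (code : List Char) : List (List Char) :=
  PySem.Chars.splitlines (rstripChars (lstripChars code ('/' :: ' ' :: '<' :: '\n' :: []))
    ('*' :: '/' :: ' ' :: '\n' :: '\t' :: []))

-- comment.rstrip() then .replace('*','\*').replace('|','\|'), identical postprocessing
def postComment (comment0 : List Char) : List Char :=
  let comment := PySem.Chars.rstrip comment0
  if comment ≠ [] then
    PySem.Chars.replace (PySem.Chars.replace comment ['*'] ['\\', '*']) ['|'] ['\\', '|']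
  else []

-- ===== PORT A =====
-- loop body of A: state (comment, empty_line)
def stepA (pfx : List Char) (s : List Char × Bool) (line : List Char) : List Char × Bool :=
  let l := cleanLine line
  if l ≠ [] then
    if s.2 then
      ((if s.1 ≠ [] then s.1 ++ sepOf pfx else s.1) ++ pfx ++ l, false)
    else
      ((if s.1 ≠ [] then s.1 ++ ['\n'] else s.1) ++ pfx ++ l, false)
  else (s.1, true)

def tcA (code pfx : List Char) : List Char :=
  if code = [] then []
  else if PySem.Chars.isIn (String.toList "gluPerspective") code then []
  else postComment ((preLines code).foldl (stepA pfx) ([], false)).1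

def translate_comment (code : String) (prefix_ : String) : String :=
  String.ofList (tcA code.toList prefix_.toList)

-- ===== PORT B =====
-- loop body of B: state (paragraphs, current)
def flushB (ps : List (List (List Char))) (cur : List (List Char)) : List (List (List Char)) :=
  if cur ≠ [] then ps ++ [cur] else ps

def stepB (pfx : List Char) (s : List (List (List Char)) × List (List Char)) (line : List Char) :
    List (List (List Char)) × List (List Char) :=
  let l := cleanLine line
  if l ≠ [] then (s.1, s.2 ++ [pfx ++ l]) else (flushB s.1 s.2, [])

def tcB (code pfx : List Char) : List Char :=
  if code = [] then []
  else if PySem.Chars.isIn (String.toList "gluPerspective") code then []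
  else
    let r := (preLines code).foldl (stepB pfx) ([], [])
    let paragraphs := flushB r.1 r.2
    postComment (PySem.Chars.join (sepOf pfx) (paragraphs.map (PySem.Chars.join ['\n'])))

def translate_comment_alt (code : String) (prefix_ : String) : String :=
  String.ofList (tcB code.toList prefix_.toList)

-- ===== PRECONDITION & SPEC =====
def Spec_translate_comment (code : String) (prefix_ : String) (out : String) : Prop := out = translate_comment_alt code prefix_
instance (code : String) (prefix_ : String) (out : String) : Decidable (Spec_translate_comment code prefix_ out) := by unfold Spec_translate_comment; infer_instance

-- ===== CLAIM (what is proved, stated in full; the proofs are below) =====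
def Claim_equal_translate_comment : Prop := ∀ (code : String) (prefix_ : String), Dom_translate_comment code prefix_ → Spec_translate_comment code prefix_ (translate_comment code prefix_)

-- ===== LEMMAS AND PROOFS =====

-- the rendered comment corresponding to B's mid-loop state
def render (pfx : List Char) (ps : List (List (List Char))) (cur : List (List Char)) : List Char :=
  PySem.Chars.join (sepOf pfx) ((flushB ps cur).map (PySem.Chars.join ['\n']))

theorem join_append_singleton {S : List Char} (zs : List (List Char)) (y : List Char) :
    PySem.Chars.join S (zs ++ [y]) = if zs = [] then y else PySem.Chars.join S zs ++ S ++ y := by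
  induction zs with
  | nil => simp [PySem.Chars.join_singleton]
  | cons x rest ih =>
    cases rest with
    | nil => simp [PySem.Chars.join_cons_cons, PySem.Chars.join_singleton]
    | cons r rs =>
      have ih' : PySem.Chars.join S ((r :: rs) ++ [y]) =
          PySem.Chars.join S (r :: rs) ++ S ++ y := by simpa using ih
      simp only [List.cons_append] at ih' ⊢
      rw [PySem.Chars.join_cons_cons, ih', if_neg (by simp), PySem.Chars.join_cons_cons]
      simp [List.append_assoc]

theorem join_last_append {S : List Char} (zs : List (List Char)) (y t : List Char) :
    PySem.Chars.join S (zs ++ [y ++ t]) = PySem.Chars.join S (zs ++ [y]) ++ t := by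
  rw [join_append_singleton, join_append_singleton]
  split_ifs <;> simp [List.append_assoc]

theorem loop_eq (pfx : List Char) (lines : List (List Char)) :
    ∀ (comment : List Char) (el : Bool) (ps : List (List (List Char))) (cur : List (List Char)),
    comment = render pfx ps cur →
    (el = true → cur = []) →
    (el = false → cur = [] → ps = []) →
    (comment = [] ↔ (ps = [] ∧ cur = [])) →
    (lines.foldl (stepA pfx) (comment, el)).1 =
      render pfx (lines.foldl (stepB pfx) (ps, cur)).1 (lines.foldl (stepB pfx) (ps, cur)).2 := by
  induction lines with
  | nil => intro comment el ps cur h1 _ _ _; simpa using h1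
  | cons line rest ih =>
    intro comment el ps cur h1 h2 h3 h5
    simp only [List.foldl_cons]
    by_cases hl : cleanLine line = []
    · -- blank line: A keeps comment, sets the flag; B flushes the current paragraph
      have sA : stepA pfx (comment, el) line = (comment, true) := by simp [stepA, hl]
      have sB : stepB pfx (ps, cur) line = (flushB ps cur, []) := by simp [stepB, hl]
      rw [sA, sB]
      apply ih
      · rw [h1]; by_cases hc : cur = [] <;> simp [render, flushB, hc]
      · intro _; rfl
      · simp
      · by_cases hc : cur = [] <;> simp [flushB, hc, h5]
    · -- non-empty cleaned line: A appends with the separator logic; B appends to current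
      have sB : stepB pfx (ps, cur) line = (ps, cur ++ [pfx ++ cleanLine line]) := by
        simp [stepB, hl]
      rw [sB]
      set l := cleanLine line with hldef
      have hx : pfx ++ l ≠ [] := by
        intro h; exact hl (List.append_eq_nil_iff.mp h).2
      have k3 : (stepA pfx (comment, el) line).1 ≠ [] := by
        simp only [stepA, ← hldef, if_pos hl]
        split_ifs <;> simp [hl]
      have k1 : (stepA pfx (comment, el) line).1 = render pfx ps (cur ++ [pfx ++ l]) := by
        by_cases hc : comment = []
        · -- comment empty ⇒ ps = [], cur = []
          obtain ⟨hps, hcur⟩ := h5.mp hc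
          subst hps hcur
          simp [stepA, ← hldef, hl, hc, render, flushB, PySem.Chars.join_singleton]
        · cases el with
          | true =>
            have hcur := h2 rfl; subst hcur
            have hps : ps ≠ [] := by
              intro h; exact hc (h5.mpr ⟨h, rfl⟩)
            have hmap : ps.map (PySem.Chars.join ['\n']) ≠ [] := by simp [hps]
            have hr : render pfx ps ([] ++ [pfx ++ l]) =
                PySem.Chars.join (sepOf pfx) (ps.map (PySem.Chars.join ['\n']) ++ [pfx ++ l]) := by
              simp [render, flushB, PySem.Chars.join_singleton]
            rw [hr, join_append_singleton, if_neg hmap]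
            have hcom : comment = PySem.Chars.join (sepOf pfx) (ps.map (PySem.Chars.join ['\n'])) := by
              rw [h1]; simp [render, flushB]
            have hc2 : PySem.Chars.join (sepOf pfx) (ps.map (PySem.Chars.join ['\n'])) ≠ [] :=
              hcom ▸ hc
            simp [stepA, ← hldef, hl, hc2, hcom, List.append_assoc]
          | false =>
            have hcur : cur ≠ [] := by
              intro h; exact hc (h5.mpr ⟨h3 rfl h, h⟩)
            have hr : render pfx ps (cur ++ [pfx ++ l]) =
                PySem.Chars.join (sepOf pfx)
                  (ps.map (PySem.Chars.join ['\n']) ++ [PySem.Chars.join ['\n'] (cur ++ [pfx ++ l])]) := by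
              simp [render, flushB]
            rw [hr, join_append_singleton (S := ['\n']) cur (pfx ++ l), if_neg hcur]
            rw [show PySem.Chars.join ['\n'] cur ++ ['\n'] ++ (pfx ++ l)
                  = PySem.Chars.join ['\n'] cur ++ (['\n'] ++ pfx ++ l) by simp [List.append_assoc]]
            rw [join_last_append]
            have hcom : comment =
                PySem.Chars.join (sepOf pfx)
                  (ps.map (PySem.Chars.join ['\n']) ++ [PySem.Chars.join ['\n'] cur]) := by
              rw [h1]; simp [render, flushB, hcur]
            have hc2 : PySem.Chars.join (sepOf pfx)
                (ps.map (PySem.Chars.join ['\n']) ++ [PySem.Chars.join ['\n'] cur]) ≠ [] :=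
              hcom ▸ hc
            simp [stepA, ← hldef, hl, hc2, hcom, List.append_assoc]
      have k2 : (stepA pfx (comment, el) line).2 = false := by
        simp [stepA, ← hldef, hl]
        split_ifs <;> rfl
      have hr : render pfx ps (cur ++ [pfx ++ l]) ≠ [] := k1 ▸ k3
      have hstep : stepA pfx (comment, el) line = (render pfx ps (cur ++ [pfx ++ l]), false) := by
        cases h : stepA pfx (comment, el) line with
        | mk a b => rw [h] at k1 k2; simp at k1 k2; rw [k1, k2]
      rw [hstep]
      apply ih
      · rfl
      · simp
      · intro _ h; exact absurd h (by simp)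
      · constructor
        · intro h; exact absurd h hr
        · rintro ⟨_, h⟩; simp at h

theorem tcA_eq_tcB (code pfx : List Char) : tcA code pfx = tcB code pfx := by
  unfold tcA tcB
  split_ifs with h1 h2
  · rfl
  · rfl
  · have := loop_eq pfx (preLines code) [] false [] []
      (by simp [render, flushB, PySem.Chars.join_nil]) (fun _ => rfl) (fun _ _ => rfl) (by simp)
    simp only [render] at this
    rw [this]

-- ===== VERDICT (by name: the statement is the Claim_ definition above) =====
theorem translate_comment_spec : Claim_equal_translate_comment := by
  intro code prefix_ _
  unfold Spec_translate_comment translate_comment translate_comment_alt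
  rw [tcA_eq_tcB]
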